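-- pv_equiv track=rewrite | github.com/radhe2205/nlp_assmnt | assmnt1/a1.py | get_encoding_len_dist
-- ===== SOURCE A (Python) =====
-- def get_encoding_len_dist(encoding, dist):
--     encoding_len = {k: len(encoding[k]) for k in encoding}
--     len_dist = {}
--     for k in encoding_len:
--         if encoding_len[k] not in len_dist:
--             len_dist[encoding_len[k]] = 0
--         len_dist[encoding_len[k]] += dist[k]
--
--     return len_dist
-- ===== SOURCE B (Python) =====
-- def get_encoding_len_dist(encoding, dist):
--     # distinct encoding lengths in first-occurrence order, then one sum per length
--     lengths = []
--     for v in encoding.values():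
--         if len(v) not in lengths:
--             lengths.append(len(v))
--     return {L: sum(dist[k] for k, v in encoding.items() if len(v) == L) for L in lengths}
-- ===== Notes on version B (the rewrite author's own statement) =====
-- stated objective: alternative
-- what changed: Replaces the hash-bucket accumulation loop (and the intermediate encoding_len dict) by a grouped formulation: collect the distinct encoding lengths in first-occurrence order, then compute each length's mass with one sum over the matching keys.
import Mathlib
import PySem

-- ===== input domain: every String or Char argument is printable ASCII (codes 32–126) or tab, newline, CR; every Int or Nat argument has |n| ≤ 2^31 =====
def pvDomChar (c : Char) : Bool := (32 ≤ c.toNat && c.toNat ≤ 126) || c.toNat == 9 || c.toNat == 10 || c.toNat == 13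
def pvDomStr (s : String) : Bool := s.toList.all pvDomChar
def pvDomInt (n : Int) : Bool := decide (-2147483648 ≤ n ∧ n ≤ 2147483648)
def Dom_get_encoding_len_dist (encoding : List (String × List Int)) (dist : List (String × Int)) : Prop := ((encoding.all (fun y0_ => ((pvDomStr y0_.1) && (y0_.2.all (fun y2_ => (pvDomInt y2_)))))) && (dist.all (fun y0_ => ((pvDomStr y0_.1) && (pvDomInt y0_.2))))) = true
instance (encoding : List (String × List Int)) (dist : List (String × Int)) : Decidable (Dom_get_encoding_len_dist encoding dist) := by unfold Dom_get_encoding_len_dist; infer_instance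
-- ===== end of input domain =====

-- B builds the same length→mass dict by grouping (distinct lengths in first-occurrence order,
-- one sum per length) instead of A's single accumulation loop; return-value equivalence only.

-- ===== PORT A =====
-- A receives Python dicts; the association lists are read as dicts (later duplicate keys overwrite).
-- dist[k] (KeyError when k is missing) is ported as getD with Pre_ excluding the missing-key case.
def get_encoding_len_dist (encoding : List (String × List Int)) (dist : List (String × Int)) : List (Int × Int) :=
  let enc := PySem.Dict.ofList encoding
  let dst := PySem.Dict.ofList dist
  -- encoding_len = {k: len(encoding[k]) for k in encoding}
  let encLen : PySem.Dict String Int :=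
    PySem.Dict.mk (enc.keys.map (fun k => (k, ((enc.getD k []).length : Int))))
  -- len_dist = {}; for k in encoding_len: if … not in …: = 0; += dist[k]
  let lenDist := encLen.keys.foldl (fun (d : PySem.Dict Int Int) k =>
      let L := encLen.getD k 0
      let d' := if d.contains L then d else d.insert L 0
      d'.insert L (d'.getD L 0 + dst.getD k 0)) PySem.Dict.empty
  lenDist.items

-- ===== PORT B =====
def get_encoding_len_dist_alt (encoding : List (String × List Int)) (dist : List (String × Int)) : List (Int × Int) :=
  let enc := PySem.Dict.ofList encoding
  let dst := PySem.Dict.ofList dist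
  -- lengths = []; for v in encoding.values(): if len(v) not in lengths: lengths.append(len(v))
  let lengths := enc.values.foldl (fun (acc : List Int) v =>
      if acc.contains ((v.length : Int)) then acc else acc ++ [((v.length : Int))]) []
  -- {L: sum(dist[k] for k, v in encoding.items() if len(v) == L) for L in lengths}
  lengths.map (fun L =>
    (L, ((enc.items.filter (fun p => ((p.2.length : Int) == L))).map (fun p => dst.getD p.1 0)).sum))

-- ===== PRECONDITION & SPEC =====
-- Pre_ excludes exactly the inputs where A raises KeyError: some key of encoding absent from dist.
def Pre_get_encoding_len_dist (encoding : List (String × List Int)) (dist : List (String × Int)) : Prop :=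
  (encoding.all (fun p => dist.any (fun q => q.1 == p.1))) = true
instance (encoding : List (String × List Int)) (dist : List (String × Int)) : Decidable (Pre_get_encoding_len_dist encoding dist) := by unfold Pre_get_encoding_len_dist; infer_instance
def pvWitness_get_encoding_len_dist : (List (String × List Int)) × (List (String × Int)) :=
  ([("a", [1, 2]), ("b", [3]), ("c", [4, 5])], [("a", 5), ("b", 7), ("c", -2)])
def Spec_get_encoding_len_dist (encoding : List (String × List Int)) (dist : List (String × Int)) (out : List (Int × Int)) : Prop := out = get_encoding_len_dist_alt encoding dist
instance (encoding : List (String × List Int)) (dist : List (String × Int)) (out : List (Int × Int)) : Decidable (Spec_get_encoding_len_dist encoding dist out) := by unfold Spec_get_encoding_len_dist; infer_instance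

-- ===== CLAIM (what is proved, stated in full; the proofs are below) =====
def Claim_equal_get_encoding_len_dist : Prop := ∀ (encoding : List (String × List Int)) (dist : List (String × Int)), Dom_get_encoding_len_dist encoding dist → Pre_get_encoding_len_dist encoding dist → Spec_get_encoding_len_dist encoding dist (get_encoding_len_dist encoding dist)

-- ===== LEMMAS AND PROOFS =====

-- weighted mass of key L in a (key, weight) list
def pvS (L : Int) (ps : List (Int × Int)) : Int := ((ps.filter (fun r => r.1 == L)).map Prod.snd).sum

theorem pvS_cons (L : Int) (p : Int × Int) (ps : List (Int × Int)) :
    pvS L (p :: ps) = if p.1 == L then p.2 + pvS L ps else pvS L ps := by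
  by_cases h : p.1 == L <;> simp [pvS, h]

theorem foldl_add_cons_mem {α : Type} [BEq α] [LawfulBEq α] (xs : List α) (a : α) (s : List α) :
    List.foldl PySem.Set.add (a :: s : PySem.Set α) xs
      = a :: List.foldl PySem.Set.add (s : PySem.Set α) (xs.filter (fun y => !(y == a))) := by
  induction xs generalizing s with
  | nil => rfl
  | cons y ys ih =>
    by_cases hy : y = a
    · subst hy
      have : PySem.Set.add (y :: s) y = (y :: s) := by
        simp [PySem.Set.add, PySem.Set.contains]
      simp [ih]
    · have hadd : PySem.Set.add (a :: s : PySem.Set α) y = a :: PySem.Set.add s y := by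
        simp [PySem.Set.add, PySem.Set.contains, hy]
        split <;> simp_all
      simp [hy, hadd, ih]

theorem ofList_cons {α : Type} [BEq α] [LawfulBEq α] (x : α) (xs : List α) :
    PySem.Set.ofList (x :: xs) = x :: PySem.Set.ofList (xs.filter (fun y => !(y == x))) := by
  have h1 : PySem.Set.ofList (x :: xs) = List.foldl PySem.Set.add ([x] : PySem.Set α) xs := rfl
  rw [h1]
  exact foldl_add_cons_mem xs x []

-- first-match lookup in a nodup-keyed items list
theorem find?_of_mem_nodup {κ ν : Type} [BEq κ] [LawfulBEq κ] (l : List (κ × ν)) (hnd : (l.map Prod.fst).Nodup)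
    (k : κ) (v : ν) (hm : (k, v) ∈ l) : l.find? (fun p => p.1 == k) = some (k, v) := by
  induction l with
  | nil => simp at hm
  | cons q qs ih =>
    simp only [List.map_cons, List.nodup_cons] at hnd
    rw [List.mem_cons] at hm
    rcases hm with hq | hm'
    · rw [← hq]; simp [List.find?]
    · have hk : (q.1 == k) = false := by
        have : k ∈ qs.map Prod.fst := List.mem_map_of_mem (f := Prod.fst) hm'
        simp only [beq_eq_false_iff_ne, ne_eq]
        intro hc; exact hnd.1 (hc ▸ this)
      simp [List.find?, hk, ih hnd.2 hm']

theorem getD_of_mem_nodup {κ ν : Type} [BEq κ] [LawfulBEq κ] (d : PySem.Dict κ ν) (hnd : d.keys.Nodup)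
    (k : κ) (v : ν) (hm : (k, v) ∈ d.items) (dflt : ν) : d.getD k dflt = v := by
  have h := find?_of_mem_nodup d.items hnd k v hm
  simp [PySem.Dict.getD, PySem.Dict.get?, h]

theorem getD_not_contains {ν : Type} (d : PySem.Dict Int ν) (k : Int)
    (h : d.contains k = false) (dflt : ν) : d.getD k dflt = dflt := by
  have : d.items.find? (fun p => p.1 == k) = none := by
    rw [List.find?_eq_none]
    intro a ha hc
    simp only [PySem.Dict.contains, List.any_eq_false] at h
    exact h a ha hc
  simp [PySem.Dict.getD, PySem.Dict.get?, this]

theorem contains_of_mem {ν : Type} (d : PySem.Dict Int ν) (q : Int × ν)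
    (hq : q ∈ d.items) : d.contains q.1 = true := by
  simp only [PySem.Dict.contains, List.any_eq_true]
  exact ⟨q, hq, by simp⟩

-- A's loop body (init-to-0 then +=) is a single insert at the accumulated value
theorem stepA_eq (d : PySem.Dict Int Int) (L w : Int) :
    (let d' := if d.contains L then d else d.insert L 0
     d'.insert L (d'.getD L 0 + w)) = d.insert L (d.getD L 0 + w) := by
  by_cases h : d.contains L = true
  · simp [h]
  · have hf : d.contains L = false := by simpa using h
    simp only [hf, Bool.false_eq_true, if_false]
    rw [PySem.Dict.getD_insert_self, PySem.Dict.insert_insert_self,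
        getD_not_contains d L hf]

theorem core_gen (ps : List (Int × Int)) (d : PySem.Dict Int Int) (hnd : d.keys.Nodup) :
    (ps.foldl (fun (d : PySem.Dict Int Int) p => d.insert p.1 (d.getD p.1 0 + p.2)) d).items
      = d.items.map (fun q => (q.1, q.2 + pvS q.1 ps))
        ++ (PySem.Set.ofList ((ps.map Prod.fst).filter (fun L => !(d.contains L)))).map
             (fun L => (L, pvS L ps)) := by
  induction ps generalizing d with
  | nil => simp [pvS, PySem.Set.ofList]
  | cons p ps ih =>
    rw [List.foldl_cons, ih (d.insert p.1 (d.getD p.1 0 + p.2))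
        (PySem.Dict.nodup_keys_insert d p.1 _ hnd)]
    by_cases h : d.contains p.1 = true
    · -- key already present: items updated in place, key set unchanged
      have hitems : (d.insert p.1 (d.getD p.1 0 + p.2)).items
          = d.items.map (fun q => if q.1 == p.1 then (p.1, d.getD p.1 0 + p.2) else q) := by
        simp [PySem.Dict.insert, h]
      have hpred : (fun L => !((d.insert p.1 (d.getD p.1 0 + p.2)).contains L))
          = (fun L => !(d.contains L)) := by
        funext L
        rw [PySem.Dict.contains_insert]
        by_cases hL : L = p.1
        · subst hL; simp [h]
        · simp [hL]
      rw [hitems, hpred, List.map_map]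
      congr 1
      · apply List.map_congr_left
        intro q hq
        simp only [Function.comp_apply, pvS_cons]
        by_cases hq1 : q.1 = p.1
        · have hv : d.getD p.1 0 = q.2 :=
            getD_of_mem_nodup d hnd p.1 q.2 (by rw [← hq1]; exact hq) 0
          simp [hq1, hv]
          ring
        · simp [show (q.1 == p.1) = false by simp [hq1],
                show (p.1 == q.1) = false by simp [Ne.symm hq1]]
      · rw [show (List.map Prod.fst (p :: ps)).filter (fun L => !(d.contains L))
              = (List.map Prod.fst ps).filter (fun L => !(d.contains L)) by
            simp [h]]
        apply List.map_congr_left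
        intro L hL
        rw [PySem.Set.mem_ofList] at hL
        have hLp : L ≠ p.1 := by
          rcases List.mem_filter.mp hL with ⟨_, hpr⟩
          intro hc; subst hc
          simp [h] at hpr
        rw [pvS_cons]
        simp [show (p.1 == L) = false by simp [Ne.symm hLp]]
    · -- new key: appended at the end
      have hf : d.contains p.1 = false := by simpa using h
      have hitems : (d.insert p.1 (d.getD p.1 0 + p.2)).items
          = d.items ++ [(p.1, p.2)] := by
        simp [PySem.Dict.insert, hf, getD_not_contains d p.1 hf]
      have hpred : ∀ L : Int, ((d.insert p.1 (d.getD p.1 0 + p.2)).contains L = false)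
          ↔ ((d.contains L = false) ∧ L ≠ p.1) := by
        intro L
        rw [PySem.Dict.contains_insert]
        constructor
        · intro hc
          simp only [Bool.or_eq_false_iff] at hc
          exact ⟨hc.2, by simpa using hc.1⟩
        · intro ⟨h1, h2⟩
          simp [h1, h2]
      rw [hitems, List.map_append]
      simp only [List.map_cons, List.map_nil]
      -- RHS new-keys part
      have hcons : ((p.1 :: ps.map Prod.fst).filter (fun L => !(d.contains L)))
          = p.1 :: (ps.map Prod.fst).filter (fun L => !(d.contains L)) := by
        simp [hf]
      rw [hcons, ofList_cons, List.filter_filter]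
      have hpredeq : ((ps.map Prod.fst).filter (fun L => !(L == p.1) && !(d.contains L)))
          = ((ps.map Prod.fst).filter
              (fun L => !((d.insert p.1 (d.getD p.1 0 + p.2)).contains L))) := by
        apply List.filter_congr
        intro L _
        by_cases hL : L = p.1
        · subst hL; simp
        · by_cases hdc : d.contains L = true <;>
            simp [PySem.Dict.contains_insert, hdc]
      rw [← hpredeq]
      -- now compare the three segments
      have hmain : d.items.map (fun q => (q.1, q.2 + pvS q.1 ps))
          = d.items.map (fun q => (q.1, q.2 + pvS q.1 (p :: ps))) := by
        apply List.map_congr_left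
        intro q hq
        have : q.1 ≠ p.1 := by
          intro hc
          have := contains_of_mem d q hq
          rw [hc] at this; rw [this] at hf; exact absurd hf (by simp)
        rw [pvS_cons]
        simp [show (p.1 == q.1) = false by simp [Ne.symm this]]
      have hvals : (PySem.Set.ofList ((ps.map Prod.fst).filter (fun L => !(L == p.1) && !(d.contains L)))).map (fun L => (L, pvS L ps))
          = (PySem.Set.ofList ((ps.map Prod.fst).filter (fun L => !(L == p.1) && !(d.contains L)))).map (fun L => (L, pvS L (p :: ps))) := by
        apply List.map_congr_left
        intro L hL
        rw [PySem.Set.mem_ofList] at hL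
        rcases List.mem_filter.mp hL with ⟨_, hpr⟩
        simp only [Bool.and_eq_true, Bool.not_eq_true', beq_eq_false_iff_ne] at hpr
        rw [pvS_cons]
        simp [show (p.1 == L) = false by simp [Ne.symm hpr.1]]
      have hhead : pvS p.1 (p :: ps) = p.2 + pvS p.1 ps := by
        rw [pvS_cons]; simp
      rw [hmain, hvals, List.map_cons, hhead]
      simp

-- the two ports agree (no hypothesis needed: both read missing dist keys through getD 0,
-- a case Pre_ rules out for the Python programs)
theorem ports_eq (encoding : List (String × List Int)) (dist : List (String × Int)) :
    get_encoding_len_dist encoding dist = get_encoding_len_dist_alt encoding dist := by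
  unfold get_encoding_len_dist get_encoding_len_dist_alt
  dsimp only
  set enc := PySem.Dict.ofList encoding with henc
  set dst := PySem.Dict.ofList dist with hdst
  have hnd : enc.keys.Nodup := PySem.Dict.nodup_keys_ofList encoding
  set encLen : PySem.Dict String Int :=
    PySem.Dict.mk (enc.keys.map (fun k => (k, ((enc.getD k []).length : Int)))) with hEL
  have hkeysEL : encLen.keys = enc.keys := by
    simp [hEL, PySem.Dict.keys]
  have hndEL : encLen.keys.Nodup := by rw [hkeysEL]; exact hnd
  have hLget : ∀ k ∈ enc.keys, encLen.getD k 0 = ((enc.getD k []).length : Int) := by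
    intro k hk
    exact getD_of_mem_nodup encLen hndEL k _
      (List.mem_map_of_mem (f := fun k => (k, ((enc.getD k []).length : Int))) hk) 0
  -- A's fold, rewritten to the clean weighted-counter fold over ps
  set g : String → Int × Int := fun k => (((enc.getD k []).length : Int), dst.getD k 0) with hg
  set ps : List (Int × Int) := enc.keys.map g with hps
  have hA : (encLen.keys.foldl (fun (d : PySem.Dict Int Int) k =>
      let L := encLen.getD k 0
      let d' := if d.contains L then d else d.insert L 0
      d'.insert L (d'.getD L 0 + dst.getD k 0)) PySem.Dict.empty)
      = ps.foldl (fun (d : PySem.Dict Int Int) p => d.insert p.1 (d.getD p.1 0 + p.2))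
          PySem.Dict.empty := by
    rw [hps, List.foldl_map, hkeysEL]
    apply PySem.List.foldl_congr_mem
    intro d k hk
    dsimp only
    rw [stepA_eq d (encLen.getD k 0) (dst.getD k 0), hLget k hk]
  rw [hA, core_gen ps PySem.Dict.empty (by simp [PySem.Dict.empty, PySem.Dict.keys])]
  have hempty : (PySem.Dict.empty : PySem.Dict Int Int).items = [] := rfl
  rw [hempty]
  simp only [List.map_nil, List.nil_append]
  have hfilter : (ps.map Prod.fst).filter
      (fun L => !((PySem.Dict.empty : PySem.Dict Int Int).contains L)) = ps.map Prod.fst := by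
    apply List.filter_eq_self.mpr
    intro a _
    rfl
  rw [hfilter]
  -- B's length list is the ordered set of first-component values of ps
  have hlens : (enc.values.foldl (fun (acc : List Int) v =>
      if acc.contains ((v.length : Int)) then acc else acc ++ [((v.length : Int))]) [])
      = PySem.Set.ofList (ps.map Prod.fst) := by
    have h1 : ps.map Prod.fst = enc.values.map (fun v => (v.length : Int)) := by
      rw [hps, List.map_map, PySem.Dict.values,
          PySem.Dict.items_eq_map_keys enc hnd [], List.map_map, List.map_map]
      rfl
    rw [h1, PySem.Set.ofList, List.foldl_map]
    rfl
  rw [hlens]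
  -- per-length sums coincide
  apply List.map_congr_left
  intro L _
  congr 1
  rw [pvS, hps, PySem.Dict.items_eq_map_keys enc hnd [], List.filter_map, List.filter_map,
      List.map_map, List.map_map]
  rfl

-- ===== VERDICT (by name: the statement is the Claim_ definition above) =====
theorem get_encoding_len_dist_spec : Claim_equal_get_encoding_len_dist := by
  intro encoding dist _hdom _hpre
  unfold Spec_get_encoding_len_dist
  exact ports_eq encoding dist
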